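-- pv_equiv track=rewrite | github.com/TomaszWs/Codewars | 7kyu/Cinemas-in-2020.py | maximum_seating
-- ===== SOURCE A (Python) =====
-- def maximum_seating(lst):
--     s = lst[:]
--     c = 0
--     for i in range(len(s)):
--         if s[i] != 0:
--             continue
--         l = (i - 1 < 0 or s[i - 1] == 0) and (i - 2 < 0 or s[i - 2]
--             == 0)
--         r = (i + 1 >=  len(s) or s[i + 1] == 0) and (i + 2 >= len(
--             s) or s[i + 2] == 0)
--         if l and r:
--             s[i] = 1
--             c += 1
--     return c
-- ===== SOURCE B (Python) =====
-- def maximum_seating(lst):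
--     # Split lst into maximal runs of consecutive zeros; each run's seat count
--     # has a closed form, so one linear scan with no mutation suffices.
--     def seats(run, lb, rb):
--         # usable window: an occupied neighbour (lb/rb) costs 2 cells of
--         # clearance, an array edge costs none; one seat per 3 usable cells
--         w = run - (2 if lb else 0) - (2 if rb else 0)
--         return (w + 2) // 3 if w > 0 else 0
--
--     total = 0
--     i = 0
--     n = len(lst)
--     lb = False
--     while i < n:
--         if lst[i] != 0:
--             lb = True
--             i += 1
--             continue
--         j = i
--         while j < n and lst[j] == 0:
--             j += 1
--         total += seats(j - i, lb, j < n)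
--         i = j
--     return total
-- ===== Notes on version B (the rewrite author's own statement) =====
-- stated objective: alternative
-- what changed: A mutates a working copy and greedily tests each cell's two neighbours on both sides; B splits the list into maximal runs of zeros and sums a closed-form per-run seat count (interior occupants cost 2 cells of clearance, array edges none, one seat per 3 usable cells), without mutation.
import Mathlib
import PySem

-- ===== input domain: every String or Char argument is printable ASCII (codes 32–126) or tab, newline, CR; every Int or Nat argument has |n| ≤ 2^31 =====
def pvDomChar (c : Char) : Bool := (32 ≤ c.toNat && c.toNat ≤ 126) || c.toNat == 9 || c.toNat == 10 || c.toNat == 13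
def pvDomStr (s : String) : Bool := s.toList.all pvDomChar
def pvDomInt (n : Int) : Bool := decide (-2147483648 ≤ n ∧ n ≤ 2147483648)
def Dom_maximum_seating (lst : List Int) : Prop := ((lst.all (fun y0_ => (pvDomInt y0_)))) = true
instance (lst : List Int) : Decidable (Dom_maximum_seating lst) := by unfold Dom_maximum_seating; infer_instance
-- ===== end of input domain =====

-- B replaces A's single mutating per-cell greedy loop by a split into maximal
-- zero-runs with a closed-form per-run count (alternative decomposition, same O(n) cost).

-- ===== PORT A =====
-- loop body of A's for-loop (s is the working copy that A mutates; here passed as state)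
def stepA (st : List Int × Int) (i : Int) : List Int × Int :=
  if PySem.List.pyGetD st.1 i 0 ≠ 0 then st
  else
    -- l: the two cells to the left are empty (or out of range); r: same to the right
    if ((decide (i - 1 < 0) || decide (PySem.List.pyGetD st.1 (i - 1) 0 = 0)) &&
        (decide (i - 2 < 0) || decide (PySem.List.pyGetD st.1 (i - 2) 0 = 0))) &&
       ((decide ((st.1.length : Int) ≤ i + 1) || decide (PySem.List.pyGetD st.1 (i + 1) 0 = 0)) &&
        (decide ((st.1.length : Int) ≤ i + 2) || decide (PySem.List.pyGetD st.1 (i + 2) 0 = 0)))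
    then (st.1.set i.toNat 1, st.2 + 1) else st

def maximum_seating (lst : List Int) : Int :=
  let s := lst            -- lst[:] (Lean lists are immutable; the caller's list is never changed)
  ((PySem.List.pyRange 0 (s.length : Int)).foldl stepA (s, 0)).2

-- ===== PORT B =====
-- closed-form seats for one maximal run of `run` zeros, bounded by an occupant
-- on the left (lb) / right (rb)
def seatsAlt (run : Int) (lb rb : Bool) : Int :=
  let w := run - (if lb then 2 else 0) - (if rb then 2 else 0)
  if w > 0 then PySem.Int.floordiv (w + 2) 3 else 0

def goAlt : List Int → Bool → Int
  | [], _ => 0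
  | x :: xs, lb =>
    if x ≠ 0 then goAlt xs true
    else
      let k := ((x :: xs).takeWhile (fun y => y == 0)).length
      seatsAlt (k : Int) lb (decide (k < (x :: xs).length)) + goAlt ((x :: xs).drop k) lb
termination_by l _ => l.length
decreasing_by
  all_goals simp_all

def maximum_seating_alt (lst : List Int) : Int := goAlt lst false

-- ===== PRECONDITION & SPEC =====
def Spec_maximum_seating (lst : List Int) (out : Int) : Prop := out = maximum_seating_alt lst
instance (lst : List Int) (out : Int) : Decidable (Spec_maximum_seating lst out) := by unfold Spec_maximum_seating; infer_instance

-- ===== CLAIM (what is proved, stated in full; the proofs are below) =====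
def Claim_equal_maximum_seating : Prop := ∀ (lst : List Int), Dom_maximum_seating lst → Spec_maximum_seating lst (maximum_seating lst)

-- ===== LEMMAS AND PROOFS =====

-- are the first two cells of xs (if any) empty?  (A's right-clearance test at i,
-- about s[i+1], s[i+2], which A has not yet mutated)
def zero2 : List Int → Bool
  | [] => true
  | [a] => a == 0
  | a :: b :: _ => a == 0 && b == 0

-- structural recursion equivalent to A's loop: a = value two cells back, b = one
-- cell back (0 when out of range), in the partially mutated list
def aRec : List Int → Int → Int → Int
  | [], _, _ => 0
  | x :: xs, a, b =>
    if x ≠ 0 then aRec xs b x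
    else if a == 0 && b == 0 && zero2 xs then 1 + aRec xs b 1
    else aRec xs b x

-- greedy count inside a run of k zeros: p = cells still blocked on the left,
-- e = true iff the run ends at the array edge
def cnt : Nat → Nat → Bool → Int
  | 0, _, _ => 0
  | k + 1, p + 1, e => cnt k p e
  | k + 1, 0, e => if 2 ≤ k ∨ e = true then 1 + cnt k 2 e else cnt k 0 e

def tailTerm : List Int → Int
  | [] => 0
  | y :: ys => aRec ys 0 y

lemma aRec_indep (l : List Int) (x x' y : Int) (hy : y ≠ 0) :
    aRec l x y = aRec l x' y := by
  cases l with
  | nil => rfl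
  | cons z zs =>
    simp only [aRec]
    have : (y == 0) = false := by simpa using hy
    simp [this]

lemma zero2_replicate_append (k : Nat) (rest : List Int)
    (hr : ∀ y ∈ rest.head?, y ≠ 0) :
    zero2 (List.replicate k 0 ++ rest) = decide (2 ≤ k ∨ rest = []) := by
  match k, rest with
  | 0, [] => rfl
  | 0, [y] => have := hr y (by simp); simp [zero2, this]
  | 0, y :: z :: t => have := hr y (by simp); simp [zero2, this]
  | 1, [] => rfl
  | 1, y :: t => have := hr y (by simp); simp [zero2, List.replicate, this]
  | (n + 2), rest => simp [zero2, List.replicate]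

lemma aRec_run (k : Nat) (rest : List Int) (a b : Int)
    (hr : ∀ y ∈ rest.head?, y ≠ 0) :
    aRec (List.replicate k 0 ++ rest) a b =
      cnt k (if b ≠ 0 then 2 else if a ≠ 0 then 1 else 0) rest.isEmpty +
        tailTerm rest := by
  induction k generalizing a b with
  | zero =>
    cases rest with
    | nil => simp [aRec, cnt, tailTerm]
    | cons y ys =>
      have hy : y ≠ 0 := hr y (by simp)
      simp [aRec, cnt, tailTerm, hy, aRec_indep ys b 0 y hy]
  | succ k ih =>
    have hz := zero2_replicate_append k rest hr
    have he : rest.isEmpty = decide (rest = []) := by cases rest <;> simp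
    simp only [List.replicate_succ, List.cons_append, aRec, hz]
    by_cases hb : b = 0
    · by_cases ha : a = 0
      · subst hb ha
        by_cases hc : 2 ≤ k ∨ rest = []
        · have hcnt : cnt (k + 1) 0 rest.isEmpty = 1 + cnt k 2 rest.isEmpty := by
            simp only [cnt, he]
            rw [if_pos (by rcases hc with h | h <;> simp [h])]
          simp only [ih 0 1]
          simp [hc]
          rw [hcnt]
          ring
        · have hcnt : cnt (k + 1) 0 rest.isEmpty = cnt k 0 rest.isEmpty := by
            simp only [cnt, he]
            rw [if_neg (by push Not at hc ⊢; exact ⟨by omega, by simpa using hc.2⟩)]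
          simp only [ih 0 0]
          simp [hc]
          exact hcnt.symm
      · subst hb
        have hcnt : cnt (k + 1) (if (0:Int) ≠ 0 then 2 else if a ≠ 0 then 1 else 0)
            rest.isEmpty = cnt k 0 rest.isEmpty := by simp [ha, cnt]
        simp only [ih 0 0]
        simp [ha, cnt]
    · have hcnt : cnt (k + 1) 2 rest.isEmpty = cnt k 1 rest.isEmpty := rfl
      have h1 : (if (0:Int) ≠ 0 then 2 else if b ≠ 0 then 1 else 0) = 1 := by simp [hb]
      simp only [ih b 0, h1]
      simp [hb, hcnt]

lemma cnt_eq (k p : Nat) (e : Bool) :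
    cnt k p e =
      (if (k : Int) - p - (if e then 0 else 2) > 0
       then ((k : Int) - p - (if e then 0 else 2) + 2) / 3 else 0) := by
  induction k generalizing p with
  | zero => cases e <;> simp [cnt]
  | succ k ih =>
    cases p with
    | succ q =>
      have h1 : cnt (k + 1) (q + 1) e = cnt k q e := rfl
      rw [h1, ih]
      cases e <;> ((try simp only [reduceIte]); split_ifs <;> omega)
    | zero =>
      by_cases hc : 2 ≤ k ∨ e = true
      · have h1 : cnt (k + 1) 0 e = 1 + cnt k 2 e := by
          simp only [cnt]; rw [if_pos hc]
        rw [h1, ih]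
        cases e with
        | false =>
          have hk : 2 ≤ k := by tauto
          (try simp only [reduceIte]); split_ifs <;> omega
        | true => (try simp only [reduceIte]); split_ifs <;> omega
      · have h1 : cnt (k + 1) 0 e = cnt k 0 e := by
          simp only [cnt]; rw [if_neg hc]
        have hk : ¬ 2 ≤ k ∧ e = false := by
          rcases Bool.eq_false_or_eq_true e with h | h <;> tauto
        obtain ⟨hk1, hk2⟩ := hk
        rw [h1, ih, hk2]
        (try simp only [reduceIte])
        split_ifs <;> first | omega | simp_all

lemma seatsAlt_eq_cnt (k : Nat) (lb rb : Bool) :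
    seatsAlt (k : Int) lb rb = cnt k (if lb then 2 else 0) (!rb) := by
  rw [cnt_eq]
  cases lb <;> cases rb <;> simp [seatsAlt]

lemma aRec_eq_goAlt (l : List Int) (lb : Bool) (a b : Int)
    (h : if lb then b ≠ 0 else a = 0 ∧ b = 0) :
    aRec l a b = goAlt l lb := by
  generalize hn : l.length = n
  induction n using Nat.strong_induction_on generalizing l lb a b with
  | _ n ih =>
  cases l with
  | nil => simp [aRec, goAlt]
  | cons x xs =>
    by_cases hx : x = 0
    · subst hx
      have hall : ∀ y ∈ ((0 : Int) :: xs).takeWhile (fun y => y == 0), y = 0 := by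
        intro y hy; simpa using List.mem_takeWhile_imp hy
      set k0 := (((0 : Int) :: xs).takeWhile (fun y => y == 0)).length with hk0
      set r := ((0 : Int) :: xs).dropWhile (fun y => y == 0) with hrdef
      have htw : ((0 : Int) :: xs).takeWhile (fun y => y == 0) = List.replicate k0 0 :=
        List.eq_replicate_iff.mpr ⟨rfl, hall⟩
      have hsplit : (0 : Int) :: xs = List.replicate k0 0 ++ r := by
        conv_lhs => rw [← List.takeWhile_append_dropWhile
          (p := fun y => y == 0) (l := (0 : Int) :: xs)]
        rw [htw]
      have hr : ∀ y ∈ r.head?, y ≠ 0 := by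
        intro y hy
        cases hco : r with
        | nil => rw [hco] at hy; simp at hy
        | cons z zs =>
          rw [hco] at hy; simp at hy
          have hw : ((0 : Int) :: xs).dropWhile (fun y => y == 0) ≠ [] := by
            rw [← hrdef, hco]; simp
          have h2 := List.head_dropWhile_not (fun y => y == 0) hw
          have hco' : ((0 : Int) :: xs).dropWhile (fun y => y == 0) = z :: zs :=
            hrdef.symm.trans hco
          simp only [hco', List.head_cons] at h2
          simp at h2
          omega
      have hkpos : 1 ≤ k0 := by rw [hk0]; simp
      have hlen : ((0 : Int) :: xs).length = k0 + r.length := by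
        conv_lhs => rw [hsplit]
        simp
      have hdrop : ((0 : Int) :: xs).drop k0 = r := by
        conv_lhs => rw [hsplit]
        exact List.drop_left' (by simp)
      have hgo : goAlt ((0 : Int) :: xs) lb =
          seatsAlt (k0 : Int) lb (decide (k0 < ((0 : Int) :: xs).length)) +
            goAlt (((0 : Int) :: xs).drop k0) lb := by
        simp only [goAlt]
        rw [if_neg (by simp), ← hk0]
      rw [hgo, hdrop]
      conv_lhs => rw [hsplit]
      rw [aRec_run k0 r a b hr]
      have hp0 : (if b ≠ 0 then 2 else if a ≠ 0 then 1 else 0) = (if lb then 2 else 0 : Nat) := by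
        cases lb with
        | true => have hb : b ≠ 0 := by simpa using h
                  simp [hb]
        | false => have hab : a = 0 ∧ b = 0 := by simpa using h
                   simp [hab.1, hab.2]
      rw [hp0, seatsAlt_eq_cnt]
      have hrb : (!decide (k0 < ((0 : Int) :: xs).length)) = r.isEmpty := by
        cases hco : r with
        | nil =>
          have h5 : ((0 : Int) :: xs).length = k0 := by rw [hlen, hco]; simp
          simp [h5]
        | cons z zs =>
          have h6 : xs.length + 1 = k0 + (zs.length + 1) := by
            have h7 := hlen
            rw [hco] at h7
            simpa using h7
          simp
          omega
      rw [hrb]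
      congr 1
      cases hco : r with
      | nil => simp [tailTerm, goAlt]
      | cons y ys =>
        have hy : y ≠ 0 := hr y (by rw [hco]; rfl)
        have hgo2 : goAlt (y :: ys) lb = goAlt ys true := by
          simp only [goAlt]; rw [if_pos hy]
        rw [hgo2]
        have hlt : ys.length < n := by
          rw [← hn]
          have := hlen
          rw [hco] at this
          simp at this ⊢
          omega
        simpa [tailTerm] using ih ys.length hlt ys true 0 y (by simpa using hy) rfl
    · have ha : aRec (x :: xs) a b = aRec xs b x := by
        simp only [aRec]; rw [if_pos hx]
      have hg : goAlt (x :: xs) lb = goAlt xs true := by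
        simp only [goAlt]; rw [if_pos hx]
      rw [ha, hg]
      exact ih xs.length (by rw [← hn]; simp) xs true b x (by simpa using hx) rfl

lemma getD_append_self (p : List Int) (x : Int) (xs : List Int) (d : Int) :
    (p ++ x :: xs).getD p.length d = x := by
  rw [List.getD_append_right _ _ _ _ (le_refl _)]
  simp

lemma getLastD_eq_getD (p : List Int) : p.getLastD 0 = p.getD (p.length - 1) 0 := by
  rw [List.getD_eq_getElem?_getD, List.getLastD_eq_getLast?, List.getLast?_eq_getElem?]

lemma lcond_eq (p : List Int) (x : Int) (xs : List Int) :
    ((decide ((p.length : Int) - 1 < 0) ||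
        decide (PySem.List.pyGetD (p ++ x :: xs) ((p.length : Int) - 1) 0 = 0)) &&
     (decide ((p.length : Int) - 2 < 0) ||
        decide (PySem.List.pyGetD (p ++ x :: xs) ((p.length : Int) - 2) 0 = 0)))
    = ((p.dropLast.getLastD 0 == 0) && (p.getLastD 0 == 0)) := by
  match p with
  | [] => simp
  | [q] =>
    have h1 : ((([q] : List Int).length : Int) - 1) = ((0 : Nat) : Int) := by simp
    rw [h1, PySem.List.pyGetD_natCast]
    simp [Bool.beq_eq_decide_eq]
  | q1 :: q2 :: qs =>
    set p := q1 :: q2 :: qs with hp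
    have hplen : 2 ≤ p.length := by rw [hp]; simp only [List.length_cons]; omega
    have h1 : ((p.length : Int) - 1) = ((p.length - 1 : Nat) : Int) := by omega
    have h2 : ((p.length : Int) - 2) = ((p.length - 2 : Nat) : Int) := by omega
    rw [h1, h2, PySem.List.pyGetD_natCast, PySem.List.pyGetD_natCast]
    rw [List.getD_append _ _ _ _ (by omega), List.getD_append _ _ _ _ (by omega)]
    have h3 : p.getD (p.length - 1) 0 = p.getLastD 0 := (getLastD_eq_getD p).symm
    have h4 : p.getD (p.length - 2) 0 = p.dropLast.getLastD 0 := by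
      rw [getLastD_eq_getD, List.getD_eq_getElem?_getD, List.getD_eq_getElem?_getD,
        List.getElem?_dropLast, List.length_dropLast]
      rw [if_pos (by omega), show p.length - 1 - 1 = p.length - 2 from by omega]
    rw [h3, h4]
    have hd1 : ¬ ((p.length - 1 : Nat) : Int) < 0 := by omega
    have hd2 : ¬ ((p.length - 2 : Nat) : Int) < 0 := by omega
    simp only [hd1, hd2, decide_false, Bool.false_or]
    cases hb : p.getLastD 0 == 0 <;> cases hab : p.dropLast.getLastD 0 == 0 <;>
      simp_all

lemma rcond_eq (p : List Int) (x : Int) (xs : List Int) :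
    ((decide (((p ++ x :: xs).length : Int) ≤ (p.length : Int) + 1) ||
        decide (PySem.List.pyGetD (p ++ x :: xs) ((p.length : Int) + 1) 0 = 0)) &&
     (decide (((p ++ x :: xs).length : Int) ≤ (p.length : Int) + 2) ||
        decide (PySem.List.pyGetD (p ++ x :: xs) ((p.length : Int) + 2) 0 = 0)))
    = zero2 xs := by
  have h1 : ((p.length : Int) + 1) = ((p.length + 1 : Nat) : Int) := by omega
  have h2 : ((p.length : Int) + 2) = ((p.length + 2 : Nat) : Int) := by omega
  rw [h1, h2, PySem.List.pyGetD_natCast, PySem.List.pyGetD_natCast]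
  match xs with
  | [] =>
    have ht : (((p ++ [x]).length : Int) ≤ ((p.length + 1 : Nat) : Int)) := by simp
    simp [zero2]
  | [y] =>
    have ha : ¬ (((p ++ [x, y]).length : Int) ≤ ((p.length + 1 : Nat) : Int)) := by
      simp only [List.length_append, List.length_cons, List.length_nil]; omega
    have hb : (((p ++ [x, y]).length : Int) ≤ ((p.length + 2 : Nat) : Int)) := by
      simp only [List.length_append, List.length_cons, List.length_nil]; omega
    have hg : (p ++ [x, y]).getD (p.length + 1) 0 = y := by
      rw [List.getD_append_right _ _ _ _ (by omega)]
      simp [show p.length + 1 - p.length = 1 by omega]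
    simp [zero2, Bool.beq_eq_decide_eq]
  | y :: z :: t =>
    have ha : ¬ (((p ++ x :: y :: z :: t).length : Int) ≤ ((p.length + 1 : Nat) : Int)) := by
      simp only [List.length_append, List.length_cons, List.length_nil]; omega
    have hb : ¬ (((p ++ x :: y :: z :: t).length : Int) ≤ ((p.length + 2 : Nat) : Int)) := by
      simp only [List.length_append, List.length_cons, List.length_nil]; omega
    have hg1 : (p ++ x :: y :: z :: t).getD (p.length + 1) 0 = y := by
      rw [List.getD_append_right _ _ _ _ (by omega)]
      simp [show p.length + 1 - p.length = 1 by omega]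
    have hg2 : (p ++ x :: y :: z :: t).getD (p.length + 2) 0 = z := by
      rw [List.getD_append_right _ _ _ _ (by omega)]
      simp [show p.length + 2 - p.length = 2 by omega]
    have hf1 : ¬ ((t.length : Int) + 1 < 0) := by omega
    have hf2 : ¬ ((t.length : Int) < 0) := by omega
    simp [zero2, hf1, hf2, Bool.beq_eq_decide_eq]

lemma set_append_self (p : List Int) (x v : Int) (xs : List Int) :
    (p ++ x :: xs).set p.length v = p ++ v :: xs := by
  rw [List.set_append, if_neg (by omega)]
  simp

lemma loopA (t : List Int) : ∀ (p : List Int) (c : Int),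
    ((PySem.List.pyRange (p.length : Int) ((p.length + t.length : Nat) : Int)).foldl
        stepA (p ++ t, c)).2 = c + aRec t (p.dropLast.getLastD 0) (p.getLastD 0) := by
  induction t with
  | nil =>
    intro p c
    have h0 : ((p.length + ([] : List Int).length : Nat) : Int) = (p.length : Int) := by simp
    rw [h0]
    have h1 : PySem.List.pyRange (p.length : Int) (p.length : Int) = [] := by
      rw [PySem.List.pyRange_one]
      simp
    rw [h1]
    simp [aRec]
  | cons x xs ih =>
    intro p c
    have hlt : ((p.length : Nat) : Int) < ((p.length + (x :: xs).length : Nat) : Int) := by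
      simp only [List.length_cons]; omega
    rw [PySem.List.pyRange_one_cons hlt, List.foldl_cons]
    have e1 : PySem.List.pyGetD (p ++ x :: xs) ((p.length : Nat) : Int) 0 = x := by
      rw [PySem.List.pyGetD_natCast]; exact getD_append_self p x xs 0
    by_cases hx : x = 0
    · subst hx
      by_cases hc : (((p.dropLast.getLastD 0 == 0) && (p.getLastD 0 == 0)) && zero2 xs) = true
      · have hstep : stepA (p ++ (0 : Int) :: xs, c) ((p.length : Nat) : Int)
            = (p ++ (1 : Int) :: xs, c + 1) := by
          simp only [stepA, e1]
          rw [if_neg (by simp), lcond_eq, rcond_eq, if_pos hc]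
          rw [show ((p.length : Nat) : Int).toNat = p.length by simp]
          rw [set_append_self]
        rw [hstep]
        have h5 := ih (p ++ [1]) (c + 1)
        rw [show (p ++ [(1 : Int)]) ++ xs = p ++ (1 : Int) :: xs by simp] at h5
        rw [show (((p ++ [(1 : Int)]).length : Nat) : Int) = ((p.length : Int) + 1) by
              simp only [List.length_append, List.length_cons, List.length_nil]; omega] at h5
        rw [show (((p ++ [(1 : Int)]).length + xs.length : Nat) : Int)
              = ((p.length + ((0 : Int) :: xs).length : Nat) : Int) by
              simp only [List.length_append, List.length_cons, List.length_nil]; omega] at h5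
        rw [h5]
        have haq : aRec ((0 : Int) :: xs) (p.dropLast.getLastD 0) (p.getLastD 0)
            = 1 + aRec xs (p.getLastD 0) 1 := by
          simp only [aRec]
          rw [if_neg (by simp), if_pos (by simp_all [Bool.and_assoc])]
        rw [haq]
        have hlast : (p ++ [(1 : Int)]).getLastD 0 = 1 := by simp
        have hlast2 : (p ++ [(1 : Int)]).dropLast.getLastD 0 = p.getLastD 0 := by
          rw [List.dropLast_concat]
        rw [hlast, hlast2]
        ring
      · have hstep : stepA (p ++ (0 : Int) :: xs, c) ((p.length : Nat) : Int)
            = (p ++ (0 : Int) :: xs, c) := by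
          simp only [stepA, e1]
          rw [if_neg (by simp), lcond_eq, rcond_eq, if_neg hc]
        rw [hstep]
        have h5 := ih (p ++ [0]) c
        rw [show (p ++ [(0 : Int)]) ++ xs = p ++ (0 : Int) :: xs by simp] at h5
        rw [show (((p ++ [(0 : Int)]).length : Nat) : Int) = ((p.length : Int) + 1) by
              simp only [List.length_append, List.length_cons, List.length_nil]; omega] at h5
        rw [show (((p ++ [(0 : Int)]).length + xs.length : Nat) : Int)
              = ((p.length + ((0 : Int) :: xs).length : Nat) : Int) by
              simp only [List.length_append, List.length_cons, List.length_nil]; omega] at h5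
        rw [h5]
        have haq : aRec ((0 : Int) :: xs) (p.dropLast.getLastD 0) (p.getLastD 0)
            = aRec xs (p.getLastD 0) 0 := by
          simp only [aRec]
          rw [if_neg (by simp), if_neg (by simp_all [Bool.and_assoc])]
        rw [haq]
        have hlast : (p ++ [(0 : Int)]).getLastD 0 = 0 := by simp
        have hlast2 : (p ++ [(0 : Int)]).dropLast.getLastD 0 = p.getLastD 0 := by
          rw [List.dropLast_concat]
        rw [hlast, hlast2]
    · have hstep : stepA (p ++ x :: xs, c) ((p.length : Nat) : Int) = (p ++ x :: xs, c) := by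
        simp only [stepA, e1]
        rw [if_pos hx]
      rw [hstep]
      have h5 := ih (p ++ [x]) c
      rw [show (p ++ [x]) ++ xs = p ++ x :: xs by simp] at h5
      rw [show (((p ++ [x]).length : Nat) : Int) = ((p.length : Int) + 1) by
            simp only [List.length_append, List.length_cons, List.length_nil]; omega] at h5
      rw [show (((p ++ [x]).length + xs.length : Nat) : Int)
            = ((p.length + (x :: xs).length : Nat) : Int) by
            simp only [List.length_append, List.length_cons, List.length_nil]; omega] at h5
      rw [h5]
      have haq : aRec (x :: xs) (p.dropLast.getLastD 0) (p.getLastD 0)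
          = aRec xs (p.getLastD 0) x := by
        simp only [aRec]
        rw [if_pos hx]
      rw [haq]
      have hlast : (p ++ [x]).getLastD 0 = x := by simp
      have hlast2 : (p ++ [x]).dropLast.getLastD 0 = p.getLastD 0 := by
        rw [List.dropLast_concat]
      rw [hlast, hlast2]

-- ===== VERDICT (by name: the statement is the Claim_ definition above) =====
theorem maximum_seating_spec : Claim_equal_maximum_seating := by
  intro lst _
  show _ = _
  have h := loopA lst [] 0
  simp only [List.nil_append, List.length_nil, Nat.zero_add, Nat.cast_zero] at h
  unfold maximum_seating maximum_seating_alt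
  simp only []
  rw [h]
  have h2 := aRec_eq_goAlt lst false 0 0 (by simp)
  simpa using h2
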